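-- pv_equiv track=rewrite | github.com/NOAA-OWP/t-route | src/troute-network/troute/HYFeaturesNetwork.py | separate_waterbodies
-- ===== SOURCE A (Python) =====
-- from collections import defaultdict
--
-- def reverse_surjective_mapping(d):
--     rd = defaultdict(list)
--     for src, dst in d.items():
--         rd[dst].append(src)
--     rd.default_factory = None
--     return rd
--
-- def separate_waterbodies(connections, waterbodies):
--     waterbody_nodes = {}
--     for wb, nodes in reverse_surjective_mapping(waterbodies).items():
--         waterbody_nodes[wb] = net = {}
--         for n in nodes:
--             if n in connections:
--                 net[n] = list(filter(waterbodies.__contains__, connections[n]))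
--     return waterbody_nodes
-- ===== SOURCE B (Python) =====
-- def separate_waterbodies(connections, waterbodies):
--     # Repeated partitioning: peel off one waterbody at a time from the pair
--     # list (head's waterbody), build its subnetwork, drop its pairs, repeat.
--     waterbody_nodes = {}
--     pairs = list(waterbodies.items())
--     while pairs:
--         wb = pairs[0][1]
--         net = {}
--         for n, w in pairs:
--             if w == wb and n in connections:
--                 net[n] = [c for c in connections[n] if c in waterbodies]
--         waterbody_nodes[wb] = net
--         pairs = [(n, w) for n, w in pairs if w != wb]
--     return waterbody_nodes
-- ===== Notes on version B (the rewrite author's own statement) =====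
-- stated objective: alternative
-- what changed: Replaces A's hash-based reverse index (defaultdict grouping values to source lists, then a nested loop over groups) with repeated list partitioning: peel off the head pair's waterbody, build its subnetwork in one scan, drop that waterbody's pairs, and repeat until the pair list is empty - no reverse mapping is ever built.
import Mathlib
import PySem

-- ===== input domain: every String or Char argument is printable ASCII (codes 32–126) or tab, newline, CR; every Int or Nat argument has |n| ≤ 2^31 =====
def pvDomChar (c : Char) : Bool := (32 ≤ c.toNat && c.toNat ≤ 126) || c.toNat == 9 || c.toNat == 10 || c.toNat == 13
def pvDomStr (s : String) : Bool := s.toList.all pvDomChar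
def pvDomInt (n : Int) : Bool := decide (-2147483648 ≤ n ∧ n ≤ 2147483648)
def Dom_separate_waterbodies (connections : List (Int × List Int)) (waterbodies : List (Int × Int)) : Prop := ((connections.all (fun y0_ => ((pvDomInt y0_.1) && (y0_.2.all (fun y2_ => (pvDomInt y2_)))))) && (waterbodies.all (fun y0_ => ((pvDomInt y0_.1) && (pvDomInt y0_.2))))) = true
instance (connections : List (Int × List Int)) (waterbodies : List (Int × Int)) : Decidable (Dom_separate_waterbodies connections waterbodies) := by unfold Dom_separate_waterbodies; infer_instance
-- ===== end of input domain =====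

-- B replaces A's defaultdict reverse index + nested group loop by repeated partitioning of the pair list (objective: alternative).

-- shared dict primitive: first-match lookup
def pvLookup {β : Type} (d : List (Int × β)) (k : Int) : Option β :=
  (d.find? (fun p => p.1 == k)).map (·.2)

-- ===== PORT A =====
-- defaultdict-style modify (update in place, append if absent)
def pvModify {β : Type} (d : List (Int × β)) (k : Int) (dflt : β) (f : β → β) : List (Int × β) :=
  if d.any (fun p => p.1 == k) then
    d.map (fun p => if p.1 == k then (p.1, f p.2) else p)
  else d ++ [(k, f dflt)]

-- reverse_surjective_mapping: rd[dst].append(src) over d.items()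
def pvReverseSurjectiveMapping (d : List (Int × Int)) : List (Int × List Int) :=
  d.foldl (fun rd p => pvModify rd p.2 [] (fun xs => xs ++ [p.1])) []

def separate_waterbodies (connections : List (Int × List Int)) (waterbodies : List (Int × Int)) : List (Int × List (Int × List Int)) :=
  (pvReverseSurjectiveMapping waterbodies).foldl
    (fun acc q =>
      acc ++ [(q.1, q.2.foldl (fun net n =>
        match pvLookup connections n with
        | some cs => net ++ [(n, cs.filter (fun c => (pvLookup waterbodies c).isSome))]
        | none => net) [])])
    []

-- ===== PORT B =====
-- 'while pairs:' loop of Source B: peel the head pair's waterbody, build its net in one scan, drop its pairs, recurse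
def pvBuild (connections : List (Int × List Int)) (waterbodies : List (Int × Int)) : List (Int × Int) → List (Int × List (Int × List Int))
  | [] => []
  | p :: ps =>
      let net := (p :: ps).foldl (fun net q =>
        if q.2 == p.2 then
          match pvLookup connections q.1 with
          | some cs => net ++ [(q.1, cs.filter (fun c => (pvLookup waterbodies c).isSome))]
          | none => net
        else net) []
      (p.2, net) :: pvBuild connections waterbodies ((p :: ps).filter (fun q => !(q.2 == p.2)))
termination_by l => l.length
decreasing_by
  simp only [List.filter_cons, beq_self_eq_true, Bool.not_true, List.length_cons]
  exact Nat.lt_succ_of_le (List.length_filter_le _ _)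

def separate_waterbodies_alt (connections : List (Int × List Int)) (waterbodies : List (Int × Int)) : List (Int × List (Int × List Int)) :=
  pvBuild connections waterbodies waterbodies

-- ===== PRECONDITION & SPEC =====
def Spec_separate_waterbodies (connections : List (Int × List Int)) (waterbodies : List (Int × Int)) (out : List (Int × List (Int × List Int))) : Prop := out = separate_waterbodies_alt connections waterbodies
instance (connections : List (Int × List Int)) (waterbodies : List (Int × Int)) (out : List (Int × List (Int × List Int))) : Decidable (Spec_separate_waterbodies connections waterbodies out) := by unfold Spec_separate_waterbodies; infer_instance

-- ===== CLAIM (what is proved, stated in full; the proofs are below) =====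
def Claim_equal_separate_waterbodies : Prop := ∀ (connections : List (Int × List Int)) (waterbodies : List (Int × Int)), Dom_separate_waterbodies connections waterbodies → Spec_separate_waterbodies connections waterbodies (separate_waterbodies connections waterbodies)

-- ===== LEMMAS AND PROOFS =====

-- per-node step shared by both characterisations
def pvStep (c : List (Int × List Int)) (w : List (Int × Int)) (net : List (Int × List Int)) (n : Int) : List (Int × List Int) :=
  match pvLookup c n with
  | some cs => net ++ [(n, cs.filter (fun x => (pvLookup w x).isSome))]
  | none => net

-- canonical form both ports are reduced to
def pvF (c : List (Int × List Int)) (w : List (Int × Int)) (pairs : List (Int × Int)) : List (Int × List (Int × List Int)) :=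
  (PySem.List.dedup (pairs.map (·.2))).map
    (fun wb => (wb, ((pairs.filter (fun p => p.2 == wb)).map (·.1)).foldl (pvStep c w) []))

theorem pvDedupAppend (l : List Int) (x : Int) :
    PySem.List.dedup (l ++ [x]) =
      if x ∈ l then PySem.List.dedup l else PySem.List.dedup l ++ [x] := by
  have hmem : x ∈ PySem.List.dedup l ↔ x ∈ l := PySem.List.mem_dedup l x
  simp only [PySem.List.dedup, PySem.Set.ofList, List.foldl_append, List.foldl_cons,
    List.foldl_nil, PySem.Set.add, PySem.Set.contains]
  by_cases h : x ∈ l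
  · rw [if_pos (by simpa [PySem.List.dedup, PySem.Set.ofList] using List.contains_iff_mem.mpr (hmem.mpr h)), if_pos h]
  · rw [if_neg (by simp only [List.contains_iff_mem]; simpa [PySem.List.dedup, PySem.Set.ofList] using fun hc => h (hmem.mp hc)), if_neg h]

-- closed form of A's reverse mapping: keys = first occurrences of values, entry = its sources in order
def pvGroup (ws : List (Int × Int)) : List (Int × List Int) :=
  (PySem.List.dedup (ws.map (·.2))).map
    (fun wb => (wb, (ws.filter (fun p => p.2 == wb)).map (·.1)))

theorem pvRSM_eq (ws : List (Int × Int)) : pvReverseSurjectiveMapping ws = pvGroup ws := by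
  induction ws using List.reverseRecOn with
  | nil => rfl
  | append_singleton l p ih =>
    have h1 : pvReverseSurjectiveMapping (l ++ [p])
        = pvModify (pvReverseSurjectiveMapping l) p.2 [] (fun xs => xs ++ [p.1]) := by
      simp [pvReverseSurjectiveMapping, List.foldl_append]
    rw [h1, ih]
    unfold pvGroup
    have hmapapp : (l ++ [p]).map (fun q : Int × Int => q.2)
        = l.map (fun q : Int × Int => q.2) ++ [p.2] := by simp
    by_cases hmem : p.2 ∈ l.map (fun q : Int × Int => q.2)
    · have hd : PySem.List.dedup ((l ++ [p]).map (fun q : Int × Int => q.2))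
          = PySem.List.dedup (l.map (fun q : Int × Int => q.2)) := by
        rw [hmapapp, pvDedupAppend, if_pos hmem]
      rw [hd]
      have hany : (List.map (fun wb => (wb, (l.filter (fun q => q.2 == wb)).map (·.1)))
          (PySem.List.dedup (l.map (fun q : Int × Int => q.2)))).any (fun q => q.1 == p.2) = true := by
        rw [List.any_map, List.any_eq_true]
        exact ⟨p.2, by simpa [PySem.List.mem_dedup] using hmem, by simp [Function.comp]⟩
      rw [pvModify, if_pos hany, List.map_map]
      refine List.map_congr_left ?_
      intro wb _
      by_cases hwb : wb = p.2
      · subst hwb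
        simp [Function.comp, List.filter_append]
      · simp [Function.comp, List.filter_append, hwb, Ne.symm hwb]
    · have hd : PySem.List.dedup ((l ++ [p]).map (fun q : Int × Int => q.2))
          = PySem.List.dedup (l.map (fun q : Int × Int => q.2)) ++ [p.2] := by
        rw [hmapapp, pvDedupAppend, if_neg hmem]
      rw [hd]
      have hany : (List.map (fun wb => (wb, (l.filter (fun q => q.2 == wb)).map (·.1)))
          (PySem.List.dedup (l.map (fun q : Int × Int => q.2)))).any (fun q => q.1 == p.2) = false := by
        rw [List.any_map, List.any_eq_false]
        intro wb hwb
        have hwmem : wb ∈ l.map (fun q : Int × Int => q.2) := by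
          simpa [PySem.List.mem_dedup] using hwb
        simp only [Function.comp, beq_iff_eq]
        intro he; exact hmem (he ▸ hwmem)
      rw [pvModify, if_neg (by simp only [hany]; exact Bool.false_ne_true), List.map_append]
      congr 1
      · refine List.map_congr_left ?_
        intro wb hwb
        have hne : p.2 ≠ wb := by
          intro he
          exact hmem (he ▸ (by simpa [PySem.List.mem_dedup] using hwb))
        simp [List.filter_append, hne]
      · have hfil : l.filter (fun q : Int × Int => q.2 == p.2) = [] := by
          refine List.filter_eq_nil_iff.mpr ?_
          intro q hq
          simp only [beq_iff_eq]
          intro he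
          exact hmem (List.mem_map.mpr ⟨q, hq, he⟩)
        simp [List.filter_append, hfil]

theorem pvFoldAppend {α β : Type} (l : List α) (g : α → β) (a : List β) :
    l.foldl (fun acc x => acc ++ [g x]) a = a ++ l.map g := by
  induction l generalizing a with
  | nil => simp
  | cons x xs ih => simp [List.foldl_cons, ih]

-- A's port reduced to the canonical form
theorem pvA_eq (c : List (Int × List Int)) (w : List (Int × Int)) :
    separate_waterbodies c w = pvF c w w := by
  unfold separate_waterbodies
  rw [pvRSM_eq, pvFoldAppend]
  unfold pvGroup pvF
  rw [List.map_map]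
  rfl

-- dedup of a cons: head, then dedup of the tail with the head's copies removed
theorem pvFoldAddSkip (x : Int) (l : List Int) (s : List Int) (hx : x ∈ s) :
    l.foldl PySem.Set.add s = (l.filter (fun y => !(y == x))).foldl PySem.Set.add s := by
  induction l generalizing s with
  | nil => rfl
  | cons y l ih =>
    by_cases hyx : y = x
    · subst hyx
      have : PySem.Set.add s y = s := by
        simp [PySem.Set.add, PySem.Set.contains, List.contains_iff_mem, hx]
      simp [List.filter_cons, this, ih s hx]
    · have hmem : x ∈ PySem.Set.add s y := by
        simp only [PySem.Set.add]
        split <;> simp [hx]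
      simp [List.filter_cons, hyx, ih _ hmem]

theorem pvFoldAddCons (x : Int) (l : List Int) (s : List Int)
    (h : ∀ y ∈ l, (y == x) = false) :
    l.foldl PySem.Set.add (x :: s) = x :: l.foldl PySem.Set.add s := by
  induction l generalizing s with
  | nil => rfl
  | cons y l ih =>
    have hyx := h y (List.mem_cons_self ..)
    have hstep : PySem.Set.add (x :: s) y = x :: PySem.Set.add s y := by
      simp only [PySem.Set.add, PySem.Set.contains, List.contains_cons, hyx, Bool.false_or]
      split <;> simp
    rw [List.foldl_cons, hstep, List.foldl_cons, ih _ (fun z hz => h z (List.mem_cons_of_mem _ hz))]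

theorem pvDedupCons (x : Int) (l : List Int) :
    PySem.List.dedup (x :: l) = x :: PySem.List.dedup (l.filter (fun y => !(y == x))) := by
  have h1 : PySem.List.dedup (x :: l) = l.foldl PySem.Set.add [x] := by
    simp [PySem.List.dedup, PySem.Set.ofList, PySem.Set.add, PySem.Set.contains]
  rw [h1, pvFoldAddSkip x l [x] (List.mem_singleton.mpr rfl)]
  have h2 : ∀ y ∈ l.filter (fun y => !(y == x)), (y == x) = false := by
    intro y hy
    have := List.of_mem_filter hy
    simpa using this
  have := pvFoldAddCons x (l.filter (fun y => !(y == x))) [] h2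
  simpa [PySem.List.dedup, PySem.Set.ofList] using this

-- B's recursion reduced to the canonical form
theorem pvBuild_eq (c : List (Int × List Int)) (w : List (Int × Int)) (pairs : List (Int × Int)) :
    pvBuild c w pairs = pvF c w pairs := by
  induction pairs using pvBuild.induct c w with
  | case1 => simp [pvBuild, pvF, PySem.List.dedup, PySem.Set.ofList]
  | case2 p ps ih =>
    rw [pvBuild]
    unfold pvF
    have hrest_map : ((p :: ps).filter (fun q => !(q.2 == p.2))).map (fun q : Int × Int => q.2)
        = ((p :: ps).map (fun q : Int × Int => q.2)).filter (fun y => !(y == p.2)) := by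
      induction (p :: ps) with
      | nil => rfl
      | cons a as iha =>
        by_cases ha : a.2 = p.2 <;> simp [List.filter_cons, ha, iha]
    have hded : PySem.List.dedup ((p :: ps).map (fun q : Int × Int => q.2))
        = p.2 :: PySem.List.dedup (((p :: ps).filter (fun q => !(q.2 == p.2))).map (fun q : Int × Int => q.2)) := by
      rw [hrest_map]
      have : (p :: ps).map (fun q : Int × Int => q.2) = p.2 :: ps.map (fun q : Int × Int => q.2) := rfl
      rw [this, pvDedupCons]
      congr 1
      simp [List.filter_cons]
    rw [hded, List.map_cons]
    congr 1
    · -- head entry: B's guarded scan = fold of pvStep over the head group's sources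
      congr 1
      rw [List.foldl_map, List.foldl_filter]
      have hfun : (fun (net : List (Int × List Int)) (q : Int × Int) =>
            if q.2 == p.2 then
              match pvLookup c q.1 with
              | some cs => net ++ [(q.1, cs.filter (fun c => (pvLookup w c).isSome))]
              | none => net
            else net)
          = (fun net q => if (q.2 == p.2) = true then pvStep c w net q.1 else net) := by
        funext net q
        by_cases hq : q.2 = p.2 <;> simp [hq, pvStep]
      rw [hfun]
    · -- tail: groups of the remaining waterbodies are unchanged by dropping the head's pairs
      rw [ih]
      unfold pvF
      refine List.map_congr_left ?_
      intro wb hwb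
      have hwb_ne : (wb == p.2) = false := by
        rw [PySem.List.mem_dedup] at hwb
        obtain ⟨q, hq, rfl⟩ := List.mem_map.mp hwb
        have := List.of_mem_filter hq
        simpa using this
      congr 2
      rw [List.filter_filter]
      congr 1
      refine List.filter_congr ?_
      intro q _
      by_cases hq : q.2 = wb
      · simp [hq, hwb_ne]
      · simp [hq]

-- ===== VERDICT (by name: the statement is the Claim_ definition above) =====
theorem separate_waterbodies_spec : Claim_equal_separate_waterbodies := by
  intro c w _
  unfold Spec_separate_waterbodies separate_waterbodies_alt
  rw [pvA_eq, pvBuild_eq]
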